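-- pv_equiv track=rewrite | github.com/arcee-ai/mergekit | mergekit/architecture.py | find_common_ordered_names
-- ===== SOURCE A (Python) =====
-- from typing import ClassVar, Dict, List, Optional, Tuple, Union
--
-- def find_common_ordered_names(
--     param_names: List[List[str]], prefixes: List[str]
-- ) -> List[str]:
--     """Identify and return common parameter names across all models, ensuring correct order. Also account for prefix."""
--     common_names = set(param_names[0])
--     for i in range(1, len(param_names)):
--         prefix = f"{prefixes[i]}." if prefixes[i] else ""
--         common_names.intersection_update({prefix + name for name in param_names[i]})
--     return [name for name in param_names[0] if name in common_names]
-- ===== SOURCE B (Python) =====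
-- def find_common_ordered_names(param_names, prefixes):
--     """Per-name direct check: keep each name of model 0 iff every other model,
--     after prefixing, contains it (no intersection accumulator is built)."""
--     first = param_names[0]
--     rest = [(param_names[i], prefixes[i]) for i in range(1, len(param_names))]
--     return [
--         name
--         for name in first
--         if all(
--             any((f"{pfx}." if pfx else "") + n == name for n in names)
--             for names, pfx in rest
--         )
--     ]
-- ===== Notes on version B (the rewrite author's own statement) =====
-- stated objective: alternative
-- what changed: Replaces A's iterated set-intersection accumulator with a per-name membership test: for each name of model 0 it directly checks, via any/all over the (names, prefix) pairs of models 1..n-1, that every other model contains the prefixed name.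
import Mathlib
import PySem

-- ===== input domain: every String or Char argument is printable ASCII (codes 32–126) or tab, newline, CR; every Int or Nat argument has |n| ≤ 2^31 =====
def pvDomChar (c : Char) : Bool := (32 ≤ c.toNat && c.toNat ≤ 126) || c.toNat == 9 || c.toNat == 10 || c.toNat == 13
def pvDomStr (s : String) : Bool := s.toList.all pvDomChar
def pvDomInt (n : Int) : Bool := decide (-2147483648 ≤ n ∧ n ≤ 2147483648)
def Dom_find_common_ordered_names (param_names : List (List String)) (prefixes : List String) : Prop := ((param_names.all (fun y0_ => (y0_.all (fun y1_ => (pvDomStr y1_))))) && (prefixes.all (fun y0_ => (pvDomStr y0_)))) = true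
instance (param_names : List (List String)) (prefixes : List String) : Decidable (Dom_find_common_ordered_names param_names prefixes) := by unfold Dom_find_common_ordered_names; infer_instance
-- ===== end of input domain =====

-- B replaces A's iterated set-intersection accumulator with a per-name direct check (all/any over the (names, prefix) pairs of models 1..n-1); same result, a different traversal.


-- ===== PORT A =====
def find_common_ordered_names (param_names : List (List String)) (prefixes : List String) : List String :=
  let first := PySem.List.pyGetD param_names 0 []
  let common : PySem.Set String :=
    (PySem.List.pyRange 1 (param_names.length : Int) 1).foldl
      (fun common i =>
        let prefix0 := PySem.List.pyGetD prefixes i ""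
        let pfx := if prefix0 ≠ "" then prefix0 ++ "." else ""
        PySem.Set.inter common
          (PySem.Set.ofList ((PySem.List.pyGetD param_names i []).map (fun name => pfx ++ name))))
      (PySem.Set.ofList first)
  first.filter (fun name => PySem.Set.contains common name)

-- ===== PORT B =====
def find_common_ordered_names_alt (param_names : List (List String)) (prefixes : List String) : List String :=
  let first := PySem.List.pyGetD param_names 0 []
  let rest : List (List String × String) :=
    (PySem.List.pyRange 1 (param_names.length : Int) 1).map
      (fun i => (PySem.List.pyGetD param_names i [], PySem.List.pyGetD prefixes i ""))
  first.filter (fun name =>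
    rest.all (fun np =>
      let p := if np.2 ≠ "" then np.2 ++ "." else ""
      np.1.any (fun n => p ++ n == name)))

-- ===== PRECONDITION & SPEC =====
-- A raises IndexError on param_names = [] (param_names[0]) and, when len(param_names) ≥ 2,
-- on prefixes shorter than param_names (prefixes[i]); exactly those inputs are excluded.
def Pre_find_common_ordered_names (param_names : List (List String)) (prefixes : List String) : Prop :=
  param_names ≠ [] ∧ (param_names.length = 1 ∨ param_names.length ≤ prefixes.length)
instance (param_names : List (List String)) (prefixes : List String) : Decidable (Pre_find_common_ordered_names param_names prefixes) := by unfold Pre_find_common_ordered_names; infer_instance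
def pvWitness_find_common_ordered_names : List (List String) × List String := ([["a", "b"], ["p.a", "b"]], ["", "p"])
def Spec_find_common_ordered_names (param_names : List (List String)) (prefixes : List String) (out : List String) : Prop := out = find_common_ordered_names_alt param_names prefixes
instance (param_names : List (List String)) (prefixes : List String) (out : List String) : Decidable (Spec_find_common_ordered_names param_names prefixes out) := by unfold Spec_find_common_ordered_names; infer_instance

-- ===== CLAIM (what is proved, stated in full; the proofs are below) =====
def Claim_equal_find_common_ordered_names : Prop := ∀ (param_names : List (List String)) (prefixes : List String), Dom_find_common_ordered_names param_names prefixes → Pre_find_common_ordered_names param_names prefixes → Spec_find_common_ordered_names param_names prefixes (find_common_ordered_names param_names prefixes)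

-- ===== LEMMAS AND PROOFS =====

-- A's fold of intersections: membership is "in the start set and in every model's set".
theorem mem_foldl_inter {S : Int → PySem.Set String} :
    ∀ (L : List Int) (s : PySem.Set String) (nm : String),
      nm ∈ L.foldl (fun c i => PySem.Set.inter c (S i)) s ↔ nm ∈ s ∧ ∀ i ∈ L, nm ∈ S i := by
  intro L
  induction L with
  | nil => simp
  | cons j L ih =>
    intro s nm
    simp [List.foldl_cons, ih, PySem.Set.mem_inter]
    tauto

-- ===== VERDICT (by name: the statement is the Claim_ definition above) =====
theorem find_common_ordered_names_spec : Claim_equal_find_common_ordered_names := by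
  intro pn ps _ _
  unfold Spec_find_common_ordered_names find_common_ordered_names find_common_ordered_names_alt
  simp only
  apply List.filter_congr
  intro nm hnm
  rw [Bool.eq_iff_iff]
  rw [PySem.Set.contains_eq_listContains, List.contains_eq_mem, decide_eq_true_eq,
    mem_foldl_inter, List.all_map, List.all_eq_true]
  constructor
  · intro ⟨_, hall⟩ i hi
    have := hall i hi
    rw [PySem.Set.mem_ofList, List.mem_map] at this
    obtain ⟨n, hn, he⟩ := this
    simp only [Function.comp, List.any_eq_true]
    exact ⟨n, hn, by rw [ite_not] at he; simp [he]⟩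
  · intro h
    refine ⟨(PySem.Set.mem_ofList _ _).mpr hnm, fun i hi => ?_⟩
    have := h i hi
    simp only [Function.comp, List.any_eq_true, beq_iff_eq] at this
    obtain ⟨n, hn, he⟩ := this
    rw [PySem.Set.mem_ofList]
    exact List.mem_map.mpr ⟨n, hn, by simpa [ite_not] using he⟩
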